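-- pv_equiv track=rewrite | github.com/chava28pvp/TemplateDash | components/main/main_table.py | expand_groups_for_networks
-- ===== SOURCE A (Python) =====
-- BASE_GROUPS = [
--     ("INTEG", ["alarmas", "integrity", "integrity_deg_pct"]),
--     ("PS_TRAFF", ["ps_traff_delta", "ps_traff_gb"]),
--     ("PS_RRC",   ["ps_rrc_ia_percent", "ps_rrc_fail"]),
--     ("PS_RAB",   ["ps_rab_ia_percent", "ps_rab_fail"]),
--     ("PS_S1",    ["ps_s1_ia_percent", "ps_s1_fail"]),
--     ("PS_DROP",  ["ps_drop_dc_percent", "ps_drop_abnrel"]),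
--     ("CS_TRAFF", ["cs_traff_delta", "cs_traff_erl"]),
--     ("CS_RRC",   ["cs_rrc_ia_percent", "cs_rrc_fail"]),
--     ("CS_RAB",   ["cs_rab_ia_percent", "cs_rab_fail"]),
--     ("CS_DROP",  ["cs_drop_dc_percent", "cs_drop_abnrel"]),
-- ]
--
-- def expand_groups_for_networks(networks: list[str]):
--     """
--     Expande los grupos BASE_GROUPS para cada network:
--     - groups_3lvl: estructura (net, grupo, [cols...]) para armar el header 3 niveles.
--     - visible_order: orden de columnas métricas a renderizar (prefijadas).
--     - end_of_group: set de “última columna” por grupo (para borde/separador visual).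
--     """
--     groups_3lvl, visible_order, end_of_group = [], [], set()
--     for net in networks:
--         for grp_title, base_cols in BASE_GROUPS:
--             cols = [f"{net}__{c}" for c in base_cols]
--             groups_3lvl.append((net, grp_title, cols))
--             visible_order.extend(cols)
--             end_of_group.add(cols[-1])
--     return groups_3lvl, visible_order, end_of_group
-- ===== SOURCE B (Python) =====
-- BASE_GROUPS = [
--     ("INTEG", ["alarmas", "integrity", "integrity_deg_pct"]),
--     ("PS_TRAFF", ["ps_traff_delta", "ps_traff_gb"]),
--     ("PS_RRC",   ["ps_rrc_ia_percent", "ps_rrc_fail"]),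
--     ("PS_RAB",   ["ps_rab_ia_percent", "ps_rab_fail"]),
--     ("PS_S1",    ["ps_s1_ia_percent", "ps_s1_fail"]),
--     ("PS_DROP",  ["ps_drop_dc_percent", "ps_drop_abnrel"]),
--     ("CS_TRAFF", ["cs_traff_delta", "cs_traff_erl"]),
--     ("CS_RRC",   ["cs_rrc_ia_percent", "cs_rrc_fail"]),
--     ("CS_RAB",   ["cs_rab_ia_percent", "cs_rab_fail"]),
--     ("CS_DROP",  ["cs_drop_dc_percent", "cs_drop_abnrel"]),
-- ]
--
-- # Constant tables derived once from BASE_GROUPS: the flattened base column order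
-- # and the last base column of each group.  Each output of the function is then an
-- # independent construction over `networks` alone (no per-output scan of BASE_GROUPS
-- # structure at call time, no shared fused accumulator).
-- _FLAT_BASE = [c for _, cols in BASE_GROUPS for c in cols]
-- _LAST_BASE = [cols[-1] for _, cols in BASE_GROUPS]
--
-- def expand_groups_for_networks(networks: list[str]):
--     groups_3lvl = [
--         (net, title, [f"{net}__{c}" for c in cols])
--         for net in networks
--         for title, cols in BASE_GROUPS
--     ]
--     visible_order = [f"{net}__{c}" for net in networks for c in _FLAT_BASE]
--     end_of_group = {f"{net}__{c}" for net in networks for c in _LAST_BASE}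
--     return groups_3lvl, visible_order, end_of_group
-- ===== Notes on version B (the rewrite author's own statement) =====
-- stated objective: alternative
-- what changed: B precomputes two constant tables from BASE_GROUPS (the flattened column order and each group's last column) and builds the three outputs as independent constructions over networks alone, instead of A's single fused loop that updates three accumulators per (network, group) pair.
import Mathlib
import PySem

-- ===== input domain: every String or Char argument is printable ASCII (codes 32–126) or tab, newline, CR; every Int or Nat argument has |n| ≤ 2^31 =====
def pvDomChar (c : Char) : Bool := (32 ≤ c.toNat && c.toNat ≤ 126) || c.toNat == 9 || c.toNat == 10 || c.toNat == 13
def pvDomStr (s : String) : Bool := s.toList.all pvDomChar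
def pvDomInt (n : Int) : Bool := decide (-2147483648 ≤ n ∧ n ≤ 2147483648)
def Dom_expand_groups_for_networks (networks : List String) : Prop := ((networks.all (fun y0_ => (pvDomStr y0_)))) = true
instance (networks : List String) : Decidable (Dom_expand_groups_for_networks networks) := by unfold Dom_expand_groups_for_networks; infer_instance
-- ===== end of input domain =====

-- B precomputes constant tables (flattened base columns, last column per group) and builds
-- each output independently over networks, replacing A's fused three-accumulator loop.

def BASE_GROUPS : List (String × List String) := [
  ("INTEG", ["alarmas", "integrity", "integrity_deg_pct"]),
  ("PS_TRAFF", ["ps_traff_delta", "ps_traff_gb"]),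
  ("PS_RRC",   ["ps_rrc_ia_percent", "ps_rrc_fail"]),
  ("PS_RAB",   ["ps_rab_ia_percent", "ps_rab_fail"]),
  ("PS_S1",    ["ps_s1_ia_percent", "ps_s1_fail"]),
  ("PS_DROP",  ["ps_drop_dc_percent", "ps_drop_abnrel"]),
  ("CS_TRAFF", ["cs_traff_delta", "cs_traff_erl"]),
  ("CS_RRC",   ["cs_rrc_ia_percent", "cs_rrc_fail"]),
  ("CS_RAB",   ["cs_rab_ia_percent", "cs_rab_fail"]),
  ("CS_DROP",  ["cs_drop_dc_percent", "cs_drop_abnrel"])]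

-- ===== PORT A =====
-- cols[-1] is ported as pyGetD cols (-1) ""; exact here since every base_cols in the
-- BASE_GROUPS literal is non-empty, so cols is never empty and Python never raises.
def expand_groups_for_networks (networks : List String) : (List (String × String × List String)) × List String × List String :=
  networks.foldl (fun st net =>
    BASE_GROUPS.foldl (fun st2 g =>
      let cols := g.2.map (fun c => net ++ "__" ++ c)
      (st2.1 ++ [(net, g.1, cols)], st2.2.1 ++ cols,
       PySem.Set.add st2.2.2 (PySem.List.pyGetD cols (-1) ""))) st)
    ([], [], [])

-- ===== PORT B =====
-- module-level constant tables of Source B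
def FLAT_BASE : List String := BASE_GROUPS.flatMap (fun g => g.2)
def LAST_BASE : List String := BASE_GROUPS.map (fun g => PySem.List.pyGetD g.2 (-1) "")

def expand_groups_for_networks_alt (networks : List String) : (List (String × String × List String)) × List String × List String :=
  let groups_3lvl := networks.flatMap (fun net =>
    BASE_GROUPS.map (fun g => (net, g.1, g.2.map (fun c => net ++ "__" ++ c))))
  let visible_order := networks.flatMap (fun net => FLAT_BASE.map (fun c => net ++ "__" ++ c))
  let end_of_group := PySem.Set.ofList (networks.flatMap (fun net => LAST_BASE.map (fun c => net ++ "__" ++ c)))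
  (groups_3lvl, visible_order, end_of_group)

-- ===== PRECONDITION & SPEC =====
def Spec_expand_groups_for_networks (networks : List String) (out : (List (String × String × List String)) × List String × List String) : Prop := out = expand_groups_for_networks_alt networks
instance (networks : List String) (out : (List (String × String × List String)) × List String × List String) : Decidable (Spec_expand_groups_for_networks networks out) := by unfold Spec_expand_groups_for_networks; infer_instance

-- ===== CLAIM (what is proved, stated in full; the proofs are below) =====
def Claim_equal_expand_groups_for_networks : Prop := ∀ (networks : List String), Dom_expand_groups_for_networks networks → Spec_expand_groups_for_networks networks (expand_groups_for_networks networks)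

-- ===== LEMMAS AND PROOFS =====

-- A's loop, started from an arbitrary state, appends B's per-network pieces.
theorem expandA_loop (networks : List String) (st : (List (String × String × List String)) × List String × List String) :
    networks.foldl (fun st net =>
      BASE_GROUPS.foldl (fun st2 g =>
        let cols := g.2.map (fun c => net ++ "__" ++ c)
        (st2.1 ++ [(net, g.1, cols)], st2.2.1 ++ cols,
         PySem.Set.add st2.2.2 (PySem.List.pyGetD cols (-1) ""))) st) st
    = (st.1 ++ networks.flatMap (fun net =>
         BASE_GROUPS.map (fun g => (net, g.1, g.2.map (fun c => net ++ "__" ++ c)))),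
       st.2.1 ++ networks.flatMap (fun net => FLAT_BASE.map (fun c => net ++ "__" ++ c)),
       PySem.Set.update st.2.2 (networks.flatMap (fun net => LAST_BASE.map (fun c => net ++ "__" ++ c)))) := by
  induction networks generalizing st with
  | nil => simp [PySem.Set.update]
  | cons net rest ih =>
      simp only [List.foldl_cons, List.flatMap_cons]
      rw [ih]
      simp [BASE_GROUPS, FLAT_BASE, LAST_BASE, PySem.Set.update, PySem.List.pyGetD, PySem.List.pyIdx?, PySem.List.pyGet?, List.foldl, List.append_assoc]

-- ===== VERDICT (by name: the statement is the Claim_ definition above) =====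
theorem expand_groups_for_networks_spec : Claim_equal_expand_groups_for_networks := by
  intro networks _
  unfold Spec_expand_groups_for_networks expand_groups_for_networks expand_groups_for_networks_alt
  rw [expandA_loop]
  simp [PySem.Set.update, PySem.Set.ofList_eq_foldl]
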